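-- pv_equiv track=rewrite | github.com/Haddox/steric_clashing_metric | scripts/design_utils.py | mutate_protein_sequence
-- ===== SOURCE A (Python) =====
-- def mutate_protein_sequence(seq, site_n, wt_aa, mut_aa):
--     """
--     Introduce an amino-acid mutation into a protein sequence
--
--     Code for doctest:
--     >>> seq = 'MTREIPLLG'
--     >>> site_n = 2
--     >>> wt_aa = 'T'
--     >>> mut_aa = 'V'
--     >>> mutate_protein_sequence(seq, site_n, wt_aa, mut_aa)
--     'MVREIPLLG'
--     """
--
--     # Go through each site in a sequence and mutate the target site
--     mut_seq = []
--     for (site_i, aa_i) in enumerate(seq, 1):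
--         if site_i == int(site_n):
--             if aa_i != wt_aa:
--                 raise ValueError("Expected the wildtype amino-acid {0}, but found {1}".format(wt_aa, mut_aa))
--             mut_seq.append(mut_aa)
--         else:
--             mut_seq.append(aa_i)
--     mut_seq = ''.join(mut_seq)
--     assert len(seq) == len(mut_seq)
--     return mut_seq
-- ===== SOURCE B (Python) =====
-- def mutate_protein_sequence(seq, site_n, wt_aa, mut_aa):
--     site = int(site_n)
--     if 1 <= site <= len(seq):
--         if seq[site - 1] != wt_aa:
--             raise ValueError("Expected the wildtype amino-acid {0}, but found {1}".format(wt_aa, mut_aa))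
--         return seq[:site - 1] + mut_aa + seq[site:]
--     return seq
-- ===== Notes on version B (the rewrite author's own statement) =====
-- stated objective: simpler
-- what changed: Replaces the per-character enumerate/append/join loop over the whole sequence with a single bounds check and direct slice concatenation seq[:site-1] + mut_aa + seq[site:].
import Mathlib
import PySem

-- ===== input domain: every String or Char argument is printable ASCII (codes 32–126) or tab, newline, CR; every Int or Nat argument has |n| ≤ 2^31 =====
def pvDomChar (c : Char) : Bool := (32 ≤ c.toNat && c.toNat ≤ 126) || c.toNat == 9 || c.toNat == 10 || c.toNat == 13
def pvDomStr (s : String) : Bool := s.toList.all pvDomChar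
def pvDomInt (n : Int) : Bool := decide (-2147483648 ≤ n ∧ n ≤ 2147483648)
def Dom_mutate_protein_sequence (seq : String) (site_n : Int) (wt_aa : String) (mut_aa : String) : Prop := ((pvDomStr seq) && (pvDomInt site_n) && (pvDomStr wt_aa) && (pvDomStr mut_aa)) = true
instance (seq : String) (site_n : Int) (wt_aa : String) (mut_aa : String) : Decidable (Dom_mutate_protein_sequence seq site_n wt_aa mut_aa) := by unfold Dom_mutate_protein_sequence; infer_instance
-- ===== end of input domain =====

-- B replaces A's per-character enumerate/append/join loop with one bounds check plus slice
-- concatenation (simpler, same O(n) cost); equivalence is about the return value on Pre_.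


-- ===== PORT A =====
-- for (site_i, aa_i) in enumerate(seq, 1): append mut_aa at the target site, aa_i elsewhere; ''.join.
-- At the target site Python raises ValueError when aa_i != wt_aa, and the final assert raises
-- AssertionError when the lengths differ — both are excluded by Pre_; on the raise branch the
-- port appends mut_aa as well (unreachable under Pre_).
def mutate_protein_sequence (seq : String) (site_n : Int) (wt_aa : String) (mut_aa : String) : String :=
  let mut_seq : List String :=
    (PySem.List.enumerate seq.toList 1).foldl
      (fun acc p =>
        if p.1 = site_n then acc ++ [mut_aa]
        else acc ++ [String.ofList [p.2]]) []
  PySem.Str.join "" mut_seq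

-- ===== PORT B =====
-- site := int(site_n); in-range: seq[:site-1] + mut_aa + seq[site:]; else seq unchanged.
-- (B's ValueError when seq[site-1] != wt_aa is excluded by Pre_; the port returns the splice.)
def mutate_protein_sequence_alt (seq : String) (site_n : Int) (wt_aa : String) (mut_aa : String) : String :=
  if 1 ≤ site_n ∧ site_n ≤ (seq.toList.length : Int) then
    String.ofList (PySem.List.slice seq.toList none (some (site_n - 1)) ++ mut_aa.toList
                   ++ PySem.List.slice seq.toList (some site_n) none)
  else seq

-- ===== PRECONDITION & SPEC =====
-- Pre_ excludes exactly the inputs where Python A raises: a ValueError when the in-range site's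
-- character differs from wt_aa, and an AssertionError when it matches but mut_aa is not one character.
def Pre_mutate_protein_sequence (seq : String) (site_n : Int) (wt_aa : String) (mut_aa : String) : Prop :=
  (1 ≤ site_n ∧ site_n ≤ (seq.toList.length : Int)) →
    (wt_aa.toList = (seq.toList.drop (site_n - 1).toNat).take 1 ∧ mut_aa.toList.length = 1)
instance (seq : String) (site_n : Int) (wt_aa : String) (mut_aa : String) : Decidable (Pre_mutate_protein_sequence seq site_n wt_aa mut_aa) := by unfold Pre_mutate_protein_sequence; infer_instance
def pvWitness_mutate_protein_sequence : String × Int × String × String := ("MTREIPLLG", 2, "T", "V")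

def Spec_mutate_protein_sequence (seq : String) (site_n : Int) (wt_aa : String) (mut_aa : String) (out : String) : Prop := out = mutate_protein_sequence_alt seq site_n wt_aa mut_aa
instance (seq : String) (site_n : Int) (wt_aa : String) (mut_aa : String) (out : String) : Decidable (Spec_mutate_protein_sequence seq site_n wt_aa mut_aa out) := by unfold Spec_mutate_protein_sequence; infer_instance

-- ===== CLAIM (what is proved, stated in full; the proofs are below) =====
def Claim_equal_mutate_protein_sequence : Prop := ∀ (seq : String) (site_n : Int) (wt_aa : String) (mut_aa : String), Dom_mutate_protein_sequence seq site_n wt_aa mut_aa → Pre_mutate_protein_sequence seq site_n wt_aa mut_aa → Spec_mutate_protein_sequence seq site_n wt_aa mut_aa (mutate_protein_sequence seq site_n wt_aa mut_aa)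

-- ===== LEMMAS AND PROOFS =====

theorem pv_join_nil_flatten (css : List (List Char)) : PySem.Chars.join [] css = css.flatten := by
  simp [PySem.Chars.join, List.intercalate]
  induction css with
  | nil => simp
  | cons c cs ih => cases cs <;> simp_all [List.intersperse]

theorem pv_foldA (site_n : Int) (wt_aa mut_aa : String) (l : List (Int × Char)) (acc : List String) :
    l.foldl (fun acc p => if p.1 = site_n then acc ++ [mut_aa] else acc ++ [String.ofList [p.2]]) acc
      = acc ++ l.map (fun p => if p.1 = site_n then mut_aa else String.ofList [p.2]) := by
  induction l generalizing acc with
  | nil => simp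
  | cons p l ih => by_cases h : p.1 = site_n <;> simp [h, ih]

theorem pv_mapEnum (site : Int) (mut_aa : String) (l : List Char) (s : Int) :
    (((PySem.List.enumerate l s).map
        (fun p => if p.1 = site then mut_aa else String.ofList [p.2])).map String.toList).flatten
      = if s ≤ site ∧ site < s + l.length then
          l.take (site - s).toNat ++ mut_aa.toList ++ l.drop ((site - s).toNat + 1)
        else l := by
  induction l generalizing s with
  | nil =>
    simp [PySem.List.enumerate]
  | cons c l ih =>
    rw [PySem.List.enumerate_cons]
    by_cases h : s = site
    · subst h
      have hif : (s ≤ s ∧ s < s + ((c :: l).length : Int)) := by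
        have : (0:Int) ≤ l.length := by positivity
        simp
      simp only [List.map_cons, List.flatten_cons, ih (s+1), if_pos hif]
      have hfalse : ¬ (s + 1 ≤ s ∧ s < s + 1 + (l.length : Int)) := by omega
      rw [if_neg hfalse]
      simp
    · have hne : ¬ ((s, c).1 = site) := by simpa using h
      simp only [List.map_cons, List.flatten_cons, if_neg hne, ih (s+1)]
      by_cases hcond : s + 1 ≤ site ∧ site < s + 1 + (l.length : Int)
      · rw [if_pos hcond]
        have hcond' : s ≤ site ∧ site < s + ((c :: l).length : Int) := by
          simp; omega
        rw [if_pos hcond']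
        have h1 : (site - s).toNat = (site - (s+1)).toNat + 1 := by omega
        rw [h1]
        simp [List.take_succ_cons, List.drop_succ_cons]
      · rw [if_neg hcond]
        have hcond' : ¬ (s ≤ site ∧ site < s + ((c :: l).length : Int)) := by
          simp; intro h1; omega
        rw [if_neg hcond']
        simp

theorem mutate_protein_sequence_toList (seq : String) (site_n : Int) (wt_aa mut_aa : String) :
    (mutate_protein_sequence seq site_n wt_aa mut_aa).toList
      = if 1 ≤ site_n ∧ site_n < 1 + (seq.toList.length : Int) then
          seq.toList.take (site_n - 1).toNat ++ mut_aa.toList ++ seq.toList.drop ((site_n - 1).toNat + 1)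
        else seq.toList := by
  unfold mutate_protein_sequence
  rw [pv_foldA site_n wt_aa mut_aa, List.nil_append, PySem.Str.toList_join]
  have : ("" : String).toList = [] := rfl
  rw [this, pv_join_nil_flatten, pv_mapEnum]

-- ===== VERDICT (by name: the statement is the Claim_ definition above) =====
theorem mutate_protein_sequence_spec : Claim_equal_mutate_protein_sequence := by
  intro seq site_n wt_aa mut_aa _hdom _hpre
  unfold Spec_mutate_protein_sequence
  apply String.toList_injective
  rw [mutate_protein_sequence_toList]
  unfold mutate_protein_sequence_alt
  by_cases h : 1 ≤ site_n ∧ site_n ≤ (seq.toList.length : Int)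
  · have h' : 1 ≤ site_n ∧ site_n < 1 + (seq.toList.length : Int) := by omega
    rw [if_pos h', if_pos h]
    have h1 : (0:Int) ≤ site_n - 1 := by omega
    have h2 : (0:Int) ≤ site_n := by omega
    rw [PySem.List.slice_to seq.toList h1, PySem.List.slice_from seq.toList h2]
    have h3 : site_n.toNat = (site_n - 1).toNat + 1 := by omega
    rw [h3]
    simp [List.append_assoc]
  · have h' : ¬ (1 ≤ site_n ∧ site_n < 1 + (seq.toList.length : Int)) := by omega
    rw [if_neg h', if_neg h]
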